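-- pv_equiv track=rewrite | github.com/StanleyTack/AOC2024 | day12/code.py | calculate_number_of_sides
-- ===== SOURCE A (Python) =====
-- def get_neighbors(x, y, max_x, max_y):
--     """Returns the valid neighboring coordinates (up, down, left, right)."""
--     neighbors = []
--     if x > 0:
--         neighbors.append((x - 1, y))
--     if x < max_x - 1:
--         neighbors.append((x + 1, y))
--     if y > 0:
--         neighbors.append((x, y - 1))
--     if y < max_y - 1:
--         neighbors.append((x, y + 1))
--     return neighbors
--
-- def calculate_number_of_sides(region, grid, max_x, max_y):
--     """
--     Calculates the total number of sides in a region.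
--     Each plot has 4 sides. Shared sides between adjacent plots reduce the total count.
--     Formula: Number of Sides = 4 * Area - 2 * Number of Adjacent Pairs
--     """
--     area = len(region)
--     adjacent_pairs = 0
--     # To avoid double-counting, we'll track processed pairs
--     processed = set()
--
--     for (x, y) in region:
--         for neighbor in get_neighbors(x, y, max_x, max_y):
--             nx, ny = neighbor
--             if grid[nx][ny] == grid[x][y]:
--                 if (nx, ny) in region:
--                     # Create a sorted tuple to avoid double-counting
--                     pair = tuple(sorted(((x, y), (nx, ny))))
--                     if pair not in processed:
--                         adjacent_pairs += 1
--                         processed.add(pair)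
--
--     number_of_sides = 4 * area - 2 * adjacent_pairs
--     return number_of_sides
-- ===== SOURCE B (Python) =====
-- def calculate_number_of_sides(region, grid, max_x, max_y):
--     """Perimeter computed directly: each plot contributes 4 minus the number of
--     its in-bounds, same-letter neighbors that belong to the region."""
--     cells = set(region)
--     perimeter = 0
--     for (x, y) in region:
--         letter = grid[x][y]
--         covered = 0
--         for (nx, ny) in ((x - 1, y), (x + 1, y), (x, y - 1), (x, y + 1)):
--             if (0 <= nx < max_x and 0 <= ny < max_y
--                     and (nx, ny) in cells and grid[nx][ny] == letter):
--                 covered += 1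
--         perimeter += 4 - covered
--     return perimeter
-- ===== Notes on version B (the rewrite author's own statement) =====
-- stated objective: simpler
-- what changed: B computes the perimeter directly, adding 4 minus the number of covered sides per cell with one letter lookup per cell, eliminating A's 'processed' set, sorted-pair keys and the 4*area-2*pairs formula. Pre_ excludes regions with adjacent same-letter cells outside the [0,max_x)x[0,max_y) box (A's asymmetric neighbor generation and negative-index wraparound give accidental values there), duplicate-cell region lists (unconstructible from Python's set argument), and degenerate inputs where a cell's own grid row is empty so B's single letter lookup raises while A, which never reads it, returns.
-- outside the precondition, e.g. on calculate_number_of_sides({(1, 0), (2, 0)}, [['a'], ['a'], ['a']], 2, 1): A returns 6, B returns 7; on calculate_number_of_sides({(0, 0)}, [[]], 1, 1): A returns 4, B raises IndexError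
import Mathlib
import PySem

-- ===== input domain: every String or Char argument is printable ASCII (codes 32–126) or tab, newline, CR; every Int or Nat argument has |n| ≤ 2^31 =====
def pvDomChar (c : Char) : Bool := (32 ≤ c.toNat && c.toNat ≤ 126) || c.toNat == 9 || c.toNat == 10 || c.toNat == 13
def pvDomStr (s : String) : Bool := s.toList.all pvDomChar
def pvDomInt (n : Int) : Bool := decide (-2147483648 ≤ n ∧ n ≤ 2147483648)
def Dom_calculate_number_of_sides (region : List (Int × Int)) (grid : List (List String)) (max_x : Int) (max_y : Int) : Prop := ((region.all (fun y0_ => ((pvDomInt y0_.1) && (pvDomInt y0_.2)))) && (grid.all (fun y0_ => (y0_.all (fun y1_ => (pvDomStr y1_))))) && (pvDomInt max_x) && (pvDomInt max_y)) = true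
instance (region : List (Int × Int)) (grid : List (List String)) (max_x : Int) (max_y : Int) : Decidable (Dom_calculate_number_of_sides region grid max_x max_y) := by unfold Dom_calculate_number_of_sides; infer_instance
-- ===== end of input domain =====

-- B computes the perimeter directly (each cell adds 4 minus its number of covered sides),
-- dropping A's processed-pair set and the 4*area-2*pairs formula; objective: simpler.

-- ===== PORT A =====
def get_neighbors (x y max_x max_y : Int) : List (Int × Int) :=
  let neighbors : List (Int × Int) := []
  let neighbors := if x > 0 then neighbors ++ [(x - 1, y)] else neighbors
  let neighbors := if x < max_x - 1 then neighbors ++ [(x + 1, y)] else neighbors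
  let neighbors := if y > 0 then neighbors ++ [(x, y - 1)] else neighbors
  let neighbors := if y < max_y - 1 then neighbors ++ [(x, y + 1)] else neighbors
  neighbors

-- grid[i][j] totalized with defaults; exact under Pre_ (both indices nonnegative and in range)
def pvGrid (grid : List (List String)) (i j : Int) : String :=
  PySem.List.pyGetD (PySem.List.pyGetD grid i []) j ""

-- tuple(sorted((a, b))) on two int pairs: lexicographic minimum first (Python tuple order)
def pvPair (a b : Int × Int) : (Int × Int) × (Int × Int) :=
  if a.1 < b.1 ∨ (a.1 = b.1 ∧ a.2 ≤ b.2) then (a, b) else (b, a)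

def calculate_number_of_sides (region : List (Int × Int)) (grid : List (List String)) (max_x : Int) (max_y : Int) : Int :=
  let area : Int := region.length
  let st : Int × PySem.Set ((Int × Int) × (Int × Int)) :=
    region.foldl (fun st p =>
      (get_neighbors p.1 p.2 max_x max_y).foldl (fun st q =>
        if pvGrid grid q.1 q.2 == pvGrid grid p.1 p.2 then
          if region.contains q then
            if PySem.Set.contains st.2 (pvPair p q) then st
            else (st.1 + 1, PySem.Set.add st.2 (pvPair p q))
          else st
        else st) st) (0, PySem.Set.empty)
  4 * area - 2 * st.1

-- ===== PORT B =====
def calculate_number_of_sides_alt (region : List (Int × Int)) (grid : List (List String)) (max_x : Int) (max_y : Int) : Int :=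
  let cells : PySem.Set (Int × Int) := PySem.Set.ofList region
  region.foldl (fun perimeter p =>
    let letter := pvGrid grid p.1 p.2
    let covered : Int :=
      [(p.1 - 1, p.2), (p.1 + 1, p.2), (p.1, p.2 - 1), (p.1, p.2 + 1)].foldl
        (fun c q =>
          if 0 ≤ q.1 ∧ q.1 < max_x ∧ 0 ≤ q.2 ∧ q.2 < max_y ∧
             PySem.Set.contains cells q = true ∧
             pvGrid grid q.1 q.2 = letter
          then c + 1 else c) 0
    perimeter + (4 - covered)) 0

-- the four candidate neighbour cells of p
def pvCands (p : Int × Int) : List (Int × Int) :=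
  [(p.1 - 1, p.2), (p.1 + 1, p.2), (p.1, p.2 - 1), (p.1, p.2 + 1)]

-- a grid position A may index without an IndexError (Python semantics: negative wraps)
def pvValid (grid : List (List String)) (q : Int × Int) : Bool :=
  decide (-((grid.length : Int)) ≤ q.1 ∧ q.1 < (grid.length : Int)) &&
  decide (-(((PySem.List.pyGetD grid q.1 []).length : Int)) ≤ q.2 ∧
          q.2 < ((PySem.List.pyGetD grid q.1 []).length : Int))

-- ===== PRECONDITION & SPEC =====
-- Pre_ excludes: regions with duplicate cells; regions with adjacent same-letter cells outside
-- the [0,max_x)x[0,max_y) box (A's dedup-pair accounting with asymmetric neighbor generation and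
-- negative-index wraparound gives accidental values there); inputs where A raises IndexError;
-- and degenerate inputs where a cell's own grid entry is unindexable yet A, which only reads it
-- while scanning a neighbor, returns — B reads each cell's letter once and raises there.
-- Admitted: in-box regions with every touched grid index in range, and regions whose adjacent
-- cells all carry different letters, with every touched access in range (both return 4*area).
def Pre_calculate_number_of_sides (region : List (Int × Int)) (grid : List (List String)) (max_x : Int) (max_y : Int) : Prop :=
  region.Nodup ∧
  ((∀ p ∈ region, (0 ≤ p.1 ∧ p.1 < max_x ∧ 0 ≤ p.2 ∧ p.2 < max_y) ∧ pvValid grid p = true ∧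
      ∀ q ∈ pvCands p, (0 ≤ q.1 ∧ q.1 < max_x ∧ 0 ≤ q.2 ∧ q.2 < max_y) →
        pvValid grid q = true)
   ∨ (∀ p ∈ region, (∀ q ∈ pvCands p, q ∈ region → pvGrid grid q.1 q.2 ≠ pvGrid grid p.1 p.2) ∧
      pvValid grid p = true ∧
      ((p.1 > 0 → pvValid grid (p.1 - 1, p.2) = true) ∧
       (p.1 < max_x - 1 → pvValid grid (p.1 + 1, p.2) = true) ∧
       (p.2 > 0 → pvValid grid (p.1, p.2 - 1) = true) ∧
       (p.2 < max_y - 1 → pvValid grid (p.1, p.2 + 1) = true))))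
instance (region : List (Int × Int)) (grid : List (List String)) (max_x : Int) (max_y : Int) : Decidable (Pre_calculate_number_of_sides region grid max_x max_y) := by unfold Pre_calculate_number_of_sides; infer_instance

def pvWitness_calculate_number_of_sides : (List (Int × Int)) × List (List String) × Int × Int :=
  ([(0, 0), (1, 0)], [["a"], ["a"]], 2, 1)

def Spec_calculate_number_of_sides (region : List (Int × Int)) (grid : List (List String)) (max_x : Int) (max_y : Int) (out : Int) : Prop := out = calculate_number_of_sides_alt region grid max_x max_y
instance (region : List (Int × Int)) (grid : List (List String)) (max_x : Int) (max_y : Int) (out : Int) : Decidable (Spec_calculate_number_of_sides region grid max_x max_y out) := by unfold Spec_calculate_number_of_sides; infer_instance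

-- ===== CLAIM (what is proved, stated in full; the proofs are below) =====
def Claim_equal_calculate_number_of_sides : Prop := ∀ (region : List (Int × Int)) (grid : List (List String)) (max_x : Int) (max_y : Int), Dom_calculate_number_of_sides region grid max_x max_y → Pre_calculate_number_of_sides region grid max_x max_y → Spec_calculate_number_of_sides region grid max_x max_y (calculate_number_of_sides region grid max_x max_y)

-- ===== LEMMAS AND PROOFS =====

def pvInBox (max_x max_y : Int) (q : Int × Int) : Bool :=
  decide (0 ≤ q.1) && decide (q.1 < max_x) && decide (0 ≤ q.2) && decide (q.2 < max_y)

def pvGood (region : List (Int × Int)) (grid : List (List String)) (max_x max_y : Int) (p q : Int × Int) : Bool :=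
  pvInBox max_x max_y q && region.contains q && (pvGrid grid q.1 q.2 == pvGrid grid p.1 p.2)

-- the list of good ordered edges of the region
def pvE (region : List (Int × Int)) (grid : List (List String)) (max_x max_y : Int) : List ((Int × Int) × (Int × Int)) :=
  region.flatMap (fun p => ((pvCands p).filter (pvGood region grid max_x max_y p)).map (fun q => (p, q)))

def pvKey (e : (Int × Int) × (Int × Int)) : (Int × Int) × (Int × Int) := pvPair e.1 e.2

def pvPle (e : (Int × Int) × (Int × Int)) : Prop :=
  e.1.1 < e.2.1 ∨ (e.1.1 = e.2.1 ∧ e.1.2 ≤ e.2.2)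

lemma nbrs_eq (max_x max_y : Int) (p : Int × Int)
    (h0 : 0 ≤ p.1) (h1 : p.1 < max_x) (h2 : 0 ≤ p.2) (h3 : p.2 < max_y) :
    get_neighbors p.1 p.2 max_x max_y = (pvCands p).filter (pvInBox max_x max_y) := by
  obtain ⟨x, y⟩ := p
  simp only at h0 h1 h2 h3
  have e1 : pvInBox max_x max_y (x - 1, y) = decide (x > 0) := by
    by_cases h : x > 0 <;> simp [pvInBox, h] <;> omega
  have e2 : pvInBox max_x max_y (x + 1, y) = decide (x < max_x - 1) := by
    by_cases h : x < max_x - 1 <;> simp [pvInBox, h] <;> omega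
  have e3 : pvInBox max_x max_y (x, y - 1) = decide (y > 0) := by
    by_cases h : y > 0 <;> simp [pvInBox, h] <;> omega
  have e4 : pvInBox max_x max_y (x, y + 1) = decide (y < max_y - 1) := by
    by_cases h : y < max_y - 1 <;> simp [pvInBox, h] <;> omega
  simp only [get_neighbors, pvCands, List.filter_cons, List.filter_nil, e1, e2, e3, e4]
  by_cases hx0 : x > 0 <;> by_cases hx1 : x < max_x - 1 <;>
    by_cases hy0 : y > 0 <;> by_cases hy1 : y < max_y - 1 <;>
    simp [hx0, hx1, hy0, hy1]

lemma le_length_update {β : Type} [BEq β] (s : PySem.Set β) (xs : List β) :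
    s.length ≤ (PySem.Set.update s xs).length := by
  induction xs generalizing s with
  | nil => simp [PySem.Set.update]
  | cons x xs ih =>
    have h1 : s.length ≤ (PySem.Set.add s x).length := by
      unfold PySem.Set.add; split <;> simp
    calc s.length ≤ (PySem.Set.add s x).length := h1
      _ ≤ _ := by
        have := ih (PySem.Set.add s x)
        simpa [PySem.Set.update] using this

-- A's count-if-new loop over a list of edges: the counter is the number of distinct keys
lemma foldl_count_new {α β : Type} [BEq β] [LawfulBEq β] (l : List α) (key : α → β)
    (c0 : Int) (s0 : PySem.Set β) :
    l.foldl (fun (st : Int × PySem.Set β) e =>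
      if PySem.Set.contains st.2 (key e) then st
      else (st.1 + 1, PySem.Set.add st.2 (key e))) (c0, s0)
    = (c0 + (((PySem.Set.update s0 (l.map key)).length - s0.length : ℕ) : Int),
       PySem.Set.update s0 (l.map key)) := by
  induction l generalizing c0 s0 with
  | nil => simp [PySem.Set.update]
  | cons e l ih =>
    simp only [List.foldl_cons, List.map_cons]
    have hupd : PySem.Set.update s0 (key e :: l.map key)
        = PySem.Set.update (PySem.Set.add s0 (key e)) (l.map key) := by
      simp [PySem.Set.update]
    by_cases h : key e ∈ s0
    · have hc : PySem.Set.contains s0 (key e) = true := by simp [h]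
      have hadd : PySem.Set.add s0 (key e) = s0 := by simp [PySem.Set.add, h]
      rw [if_pos hc, ih, hupd, hadd]
    · have hadd : PySem.Set.add s0 (key e) = s0 ++ [key e] := by simp [PySem.Set.add, h]
      rw [if_neg (by simp [h]), ih, hupd, hadd]
      have hlen : s0.length + 1 ≤ (PySem.Set.update (s0 ++ [key e]) (l.map key)).length := by
        have := le_length_update (s0 ++ [key e]) (l.map key)
        simpa using this
      simp only [Prod.mk.injEq, List.length_append, List.length_cons, List.length_nil]
      exact ⟨by omega, trivial⟩

-- A's inner loop over the neighbours of p, rewritten as the count-if-new loop over p's edges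
lemma inner_eq (region : List (Int × Int)) (grid : List (List String)) (max_x max_y : Int)
    (p : Int × Int) (hp : 0 ≤ p.1 ∧ p.1 < max_x ∧ 0 ≤ p.2 ∧ p.2 < max_y)
    (st : Int × PySem.Set ((Int × Int) × (Int × Int))) :
    (get_neighbors p.1 p.2 max_x max_y).foldl (fun st q =>
        if pvGrid grid q.1 q.2 == pvGrid grid p.1 p.2 then
          if region.contains q then
            if PySem.Set.contains st.2 (pvPair p q) then st
            else (st.1 + 1, PySem.Set.add st.2 (pvPair p q))
          else st
        else st) st
    = (((pvCands p).filter (pvGood region grid max_x max_y p)).map (fun q => (p, q))).foldl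
        (fun st e => if PySem.Set.contains st.2 (pvKey e) then st
          else (st.1 + 1, PySem.Set.add st.2 (pvKey e))) st := by
  rw [nbrs_eq max_x max_y p hp.1 hp.2.1 hp.2.2.1 hp.2.2.2]
  rw [List.foldl_map]
  have hstep : (fun (st : Int × PySem.Set ((Int × Int) × (Int × Int))) q =>
        if pvGrid grid q.1 q.2 == pvGrid grid p.1 p.2 then
          if region.contains q then
            if PySem.Set.contains st.2 (pvPair p q) then st
            else (st.1 + 1, PySem.Set.add st.2 (pvPair p q))
          else st
        else st)
      = (fun st q => if (region.contains q && (pvGrid grid q.1 q.2 == pvGrid grid p.1 p.2)) = true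
          then (if PySem.Set.contains st.2 (pvKey (p, q)) then st
            else (st.1 + 1, PySem.Set.add st.2 (pvKey (p, q)))) else st) := by
    funext st q
    by_cases hg : (pvGrid grid q.1 q.2 == pvGrid grid p.1 p.2) = true <;>
      by_cases hc : region.contains q = true <;> simp [hg, pvKey]
  rw [hstep, PySem.List.foldl_if_eq_foldl_filter, List.filter_filter]
  congr 1
  apply List.filter_congr
  intro q _
  simp only [pvGood]
  cases pvInBox max_x max_y q <;> cases region.contains q <;>
    cases pvGrid grid q.1 q.2 == pvGrid grid p.1 p.2 <;> rfl

-- A in closed form: 4*area minus twice the number of distinct unordered good edges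
lemma A_closed (region : List (Int × Int)) (grid : List (List String)) (max_x max_y : Int)
    (hbox : ∀ p ∈ region, 0 ≤ p.1 ∧ p.1 < max_x ∧ 0 ≤ p.2 ∧ p.2 < max_y) :
    calculate_number_of_sides region grid max_x max_y
      = 4 * (region.length : Int)
        - 2 * (((PySem.Set.ofList ((pvE region grid max_x max_y).map pvKey)).length : ℕ) : Int) := by
  have outer : ∀ (l : List (Int × Int)), (∀ p ∈ l, 0 ≤ p.1 ∧ p.1 < max_x ∧ 0 ≤ p.2 ∧ p.2 < max_y) →
      ∀ (st : Int × PySem.Set ((Int × Int) × (Int × Int))),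
      l.foldl (fun st p =>
        (get_neighbors p.1 p.2 max_x max_y).foldl (fun st q =>
          if pvGrid grid q.1 q.2 == pvGrid grid p.1 p.2 then
            if region.contains q then
              if PySem.Set.contains st.2 (pvPair p q) then st
              else (st.1 + 1, PySem.Set.add st.2 (pvPair p q))
            else st
          else st) st) st
      = (l.flatMap (fun p => ((pvCands p).filter (pvGood region grid max_x max_y p)).map (fun q => (p, q)))).foldl
          (fun st e => if PySem.Set.contains st.2 (pvKey e) then st
            else (st.1 + 1, PySem.Set.add st.2 (pvKey e))) st := by
    intro l hl
    induction l with
    | nil => intro st; simp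
    | cons p l ih =>
      intro st
      simp only [List.foldl_cons, List.flatMap_cons, List.foldl_append]
      rw [inner_eq region grid max_x max_y p (hl p (by simp))]
      exact ih (fun r hr => hl r (by simp [hr])) _
  show 4 * (region.length : Int) - 2 * (region.foldl _ ((0 : Int), PySem.Set.empty)).1 = _
  rw [outer region hbox, foldl_count_new]
  simp [pvE, PySem.Set.update, PySem.Set.ofList_eq_foldl]

-- a count-if loop is the length of the filtered list
lemma foldl_ite_count {α : Type} (P : α → Prop) [DecidablePred P] (b : α → Bool)
    (hPb : ∀ x, P x ↔ b x = true) :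
    ∀ (l : List α) (c : Int),
      l.foldl (fun c q => if P q then c + 1 else c) c = c + ((l.filter b).length : Int) := by
  intro l
  induction l with
  | nil => intro c; simp
  | cons q l ih =>
    intro c
    rw [List.foldl_cons, List.filter_cons]
    by_cases h : P q
    · rw [if_pos h, if_pos ((hPb q).mp h), ih]
      simp only [List.length_cons]
      push_cast
      ring
    · rw [if_neg h, if_neg (fun hb => h ((hPb q).mpr hb)), ih]

lemma covered_eq (region : List (Int × Int)) (grid : List (List String)) (max_x max_y : Int)
    (p : Int × Int) :
    ([(p.1 - 1, p.2), (p.1 + 1, p.2), (p.1, p.2 - 1), (p.1, p.2 + 1)].foldl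
        (fun (c : Int) q =>
          if 0 ≤ q.1 ∧ q.1 < max_x ∧ 0 ≤ q.2 ∧ q.2 < max_y ∧
             PySem.Set.contains (PySem.Set.ofList region) q = true ∧
             pvGrid grid q.1 q.2 = pvGrid grid p.1 p.2
          then c + 1 else c) 0)
    = (((pvCands p).filter (pvGood region grid max_x max_y p)).length : Int) := by
  have hPb : ∀ q : Int × Int,
      (0 ≤ q.1 ∧ q.1 < max_x ∧ 0 ≤ q.2 ∧ q.2 < max_y ∧
        PySem.Set.contains (PySem.Set.ofList region) q = true ∧
        pvGrid grid q.1 q.2 = pvGrid grid p.1 p.2)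
      ↔ pvGood region grid max_x max_y p q = true := by
    intro q
    simp [pvGood, pvInBox, and_assoc]
  simpa [pvCands] using foldl_ite_count _ _ hPb
    [(p.1 - 1, p.2), (p.1 + 1, p.2), (p.1, p.2 - 1), (p.1, p.2 + 1)] 0

-- B in closed form: 4*area minus the number of good ordered edges
lemma B_closed (region : List (Int × Int)) (grid : List (List String)) (max_x max_y : Int) :
    calculate_number_of_sides_alt region grid max_x max_y
      = 4 * (region.length : Int) - ((pvE region grid max_x max_y).length : Int) := by
  have gen : ∀ (l : List (Int × Int)) (i : Int),
      l.foldl (fun perimeter p =>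
        perimeter + (4 - ([(p.1 - 1, p.2), (p.1 + 1, p.2), (p.1, p.2 - 1), (p.1, p.2 + 1)].foldl
          (fun (c : Int) q =>
            if 0 ≤ q.1 ∧ q.1 < max_x ∧ 0 ≤ q.2 ∧ q.2 < max_y ∧
               PySem.Set.contains (PySem.Set.ofList region) q = true ∧
               pvGrid grid q.1 q.2 = pvGrid grid p.1 p.2
            then c + 1 else c) 0))) i
      = i + 4 * (l.length : Int)
        - ((l.flatMap (fun p => ((pvCands p).filter (pvGood region grid max_x max_y p)).map (fun q => (p, q)))).length : Int) := by
    intro l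
    induction l with
    | nil => intro i; simp
    | cons p l ih =>
      intro i
      rw [List.foldl_cons, covered_eq region grid max_x max_y p, ih, List.flatMap_cons]
      rw [List.length_append, List.length_map]
      simp only [List.length_cons]
      push_cast
      ring
  show region.foldl _ 0 = _
  simpa [pvE] using gen region 0

lemma pvKey_of_ple (e : (Int × Int) × (Int × Int)) (h : pvPle e) : pvKey e = e := by
  obtain ⟨⟨a, b⟩, ⟨c, d⟩⟩ := e
  simp only [pvKey, pvPair, pvPle] at *
  rw [if_pos h]

lemma pvKey_of_not_ple (e : (Int × Int) × (Int × Int)) (h : ¬ pvPle e) : pvKey e = (e.2, e.1) := by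
  obtain ⟨⟨a, b⟩, ⟨c, d⟩⟩ := e
  simp only [pvKey, pvPair, pvPle] at *
  rw [if_neg h]

lemma ple_swap (e : (Int × Int) × (Int × Int)) (hne : e.1 ≠ e.2) (h : ¬ pvPle e) :
    pvPle (e.2, e.1) := by
  obtain ⟨⟨a, b⟩, ⟨c, d⟩⟩ := e
  simp only [pvPle, ne_eq, Prod.mk.injEq, not_and] at *
  omega

lemma not_ple_swap (e : (Int × Int) × (Int × Int)) (hne : e.1 ≠ e.2) (h : pvPle e) :
    ¬ pvPle (e.2, e.1) := by
  obtain ⟨⟨a, b⟩, ⟨c, d⟩⟩ := e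
  simp only [pvPle, ne_eq, Prod.mk.injEq, not_and] at *
  omega

-- handshake on a symmetric, irreflexive finite edge set: |F| = 2 * |F/key|
lemma double_count (F : Finset ((Int × Int) × (Int × Int)))
    (hsym : ∀ e ∈ F, (e.2, e.1) ∈ F) (hne : ∀ e ∈ F, e.1 ≠ e.2) :
    F.card = 2 * (F.image pvKey).card := by
  haveI : DecidablePred pvPle := fun e => by unfold pvPle; infer_instance
  have hsplit : (F.filter pvPle).card + (F.filter (fun e => ¬ pvPle e)).card = F.card :=
    Finset.card_filter_add_card_filter_not _
  have himg : F.image pvKey = (F.filter pvPle).image pvKey := by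
    apply Finset.Subset.antisymm
    · intro k hk
      obtain ⟨e, heF, hek⟩ := Finset.mem_image.mp hk
      by_cases hp : pvPle e
      · exact Finset.mem_image.mpr ⟨e, Finset.mem_filter.mpr ⟨heF, hp⟩, hek⟩
      · refine Finset.mem_image.mpr ⟨(e.2, e.1), Finset.mem_filter.mpr
          ⟨hsym e heF, ple_swap e (hne e heF) hp⟩, ?_⟩
        rw [pvKey_of_ple _ (ple_swap e (hne e heF) hp), ← pvKey_of_not_ple e hp, hek]
    · exact Finset.image_subset_image (Finset.filter_subset _ _)
  have hinj : ((F.filter pvPle).image pvKey).card = (F.filter pvPle).card := by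
    apply Finset.card_image_of_injOn
    intro e he e' he' hk
    rw [pvKey_of_ple e (Finset.mem_filter.mp he).2,
       pvKey_of_ple e' (Finset.mem_filter.mp he').2] at hk
    exact hk
  have hbij : (F.filter (fun e => ¬ pvPle e)).card = (F.filter pvPle).card := by
    apply Finset.card_bij' (fun e _ => ((e.2, e.1) : (Int × Int) × (Int × Int)))
      (fun e _ => ((e.2, e.1) : (Int × Int) × (Int × Int)))
    · intro e he
      have h := Finset.mem_filter.mp he
      exact Finset.mem_filter.mpr ⟨hsym e h.1, ple_swap e (hne e h.1) h.2⟩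
    · intro e he
      have h := Finset.mem_filter.mp he
      exact Finset.mem_filter.mpr ⟨hsym e h.1, not_ple_swap e (hne e h.1) h.2⟩
    · intro e _; rfl
    · intro e _; rfl
  have himgc : (F.image pvKey).card = ((F.filter pvPle).image pvKey).card := by rw [himg]
  omega

lemma mem_cands_symm (p q : Int × Int) (h : q ∈ pvCands p) : p ∈ pvCands q := by
  obtain ⟨a, b⟩ := p
  obtain ⟨c, d⟩ := q
  simp [pvCands, Prod.ext_iff] at h ⊢
  omega

lemma ne_of_mem_cands (p q : Int × Int) (h : q ∈ pvCands p) : p ≠ q := by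
  obtain ⟨a, b⟩ := p
  obtain ⟨c, d⟩ := q
  simp [pvCands, Prod.ext_iff] at h ⊢
  omega

lemma nodup_cands (p : Int × Int) : (pvCands p).Nodup := by
  obtain ⟨a, b⟩ := p
  simp [pvCands, Prod.ext_iff]
  omega

lemma mem_E_iff (region : List (Int × Int)) (grid : List (List String)) (max_x max_y : Int)
    (e : (Int × Int) × (Int × Int)) :
    e ∈ pvE region grid max_x max_y
      ↔ e.1 ∈ region ∧ e.2 ∈ pvCands e.1 ∧ pvGood region grid max_x max_y e.1 e.2 = true := by
  obtain ⟨p, q⟩ := e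
  simp only [pvE, List.mem_flatMap, List.mem_map, List.mem_filter]
  constructor
  · rintro ⟨p', hp', q', ⟨hq', hg'⟩, heq⟩
    obtain ⟨h1, h2⟩ := Prod.mk.injEq .. ▸ heq
    subst h1; subst h2
    exact ⟨hp', hq', hg'⟩
  · rintro ⟨hp, hq, hg⟩
    exact ⟨p, hp, q, ⟨hq, hg⟩, rfl⟩

lemma E_symm (region : List (Int × Int)) (grid : List (List String)) (max_x max_y : Int)
    (hbox : ∀ p ∈ region, 0 ≤ p.1 ∧ p.1 < max_x ∧ 0 ≤ p.2 ∧ p.2 < max_y)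
    (e : (Int × Int) × (Int × Int)) (he : e ∈ pvE region grid max_x max_y) :
    (e.2, e.1) ∈ pvE region grid max_x max_y := by
  rw [mem_E_iff] at he ⊢
  obtain ⟨hp, hq, hg⟩ := he
  simp only [pvGood, Bool.and_eq_true, beq_iff_eq, List.contains_eq_mem, decide_eq_true_eq] at hg
  obtain ⟨⟨hbx, hmem⟩, hgr⟩ := hg
  refine ⟨hmem, mem_cands_symm _ _ hq, ?_⟩
  simp only [pvGood, Bool.and_eq_true, beq_iff_eq, List.contains_eq_mem, decide_eq_true_eq,
    pvInBox]
  have hb := hbox e.1 hp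
  refine ⟨⟨?_, hp⟩, hgr.symm⟩
  simp [hb.1, hb.2.1, hb.2.2.1, hb.2.2.2]

lemma E_ne (region : List (Int × Int)) (grid : List (List String)) (max_x max_y : Int)
    (e : (Int × Int) × (Int × Int)) (he : e ∈ pvE region grid max_x max_y) : e.1 ≠ e.2 := by
  rw [mem_E_iff] at he
  exact ne_of_mem_cands _ _ he.2.1

lemma nodup_E (region : List (Int × Int)) (grid : List (List String)) (max_x max_y : Int)
    (hN : region.Nodup) : (pvE region grid max_x max_y).Nodup := by
  unfold pvE
  have : ∀ (l : List (Int × Int)), l.Nodup →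
      (l.flatMap (fun p => ((pvCands p).filter (pvGood region grid max_x max_y p)).map (fun q => (p, q)))).Nodup := by
    intro l hl
    induction l with
    | nil => simp
    | cons p l ih =>
      rw [List.flatMap_cons, List.nodup_append]
      obtain ⟨hpl, hl'⟩ := List.nodup_cons.mp hl
      refine ⟨?_, ih hl', ?_⟩
      · exact ((nodup_cands p).filter _).map (by intro a b h; simpa [Prod.ext_iff] using h)
      · intro a ha b hb hab
        obtain ⟨q, hq, heqa⟩ := List.mem_map.mp ha
        obtain ⟨p', hp', hb'⟩ := List.mem_flatMap.mp hb
        obtain ⟨q', hq', heqb⟩ := List.mem_map.mp hb'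
        apply hpl
        have hpp : p = p' := congrArg Prod.fst ((heqa.trans hab).trans heqb.symm)
        exact hpp ▸ hp'
  exact this region hN

lemma set_ofList_length_eq_card {α : Type} [BEq α] [LawfulBEq α] [DecidableEq α] (l : List α) :
    (PySem.Set.ofList l).length = l.toFinset.card := by
  have h1 : (PySem.Set.ofList l).Nodup := PySem.Set.nodup_ofList l
  have h2 : (PySem.Set.ofList l).toFinset = l.toFinset := by
    ext x
    simp [PySem.Set.mem_ofList]
  rw [← List.toFinset_card_of_nodup h1, h2]

-- the handshake lemma for the region's edge list
lemma E_handshake (region : List (Int × Int)) (grid : List (List String)) (max_x max_y : Int)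
    (hN : region.Nodup)
    (hbox : ∀ p ∈ region, 0 ≤ p.1 ∧ p.1 < max_x ∧ 0 ≤ p.2 ∧ p.2 < max_y) :
    (pvE region grid max_x max_y).length
      = 2 * (PySem.Set.ofList ((pvE region grid max_x max_y).map pvKey)).length := by
  set E := pvE region grid max_x max_y with hE
  have hmapfin : (E.map pvKey).toFinset = E.toFinset.image pvKey := by
    ext k; simp
  rw [set_ofList_length_eq_card, hmapfin,
    ← List.toFinset_card_of_nodup (nodup_E region grid max_x max_y hN)]
  exact double_count E.toFinset
    (by intro e he; simp only [List.mem_toFinset] at he ⊢; exact E_symm region grid max_x max_y hbox e he)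
    (by intro e he; exact E_ne region grid max_x max_y e (List.mem_toFinset.mp he))

lemma mem_cands_of_mem_nbrs (x y max_x max_y : Int) (q : Int × Int)
    (hq : q ∈ get_neighbors x y max_x max_y) : q ∈ pvCands (x, y) := by
  unfold get_neighbors at hq
  split_ifs at hq <;> simp_all [pvCands] <;> tauto

-- when no two adjacent region cells carry the same letter A's inner loop never changes the state
lemma A_iso (region : List (Int × Int)) (grid : List (List String)) (max_x max_y : Int)
    (hiso : ∀ p ∈ region, ∀ q ∈ pvCands p, q ∈ region → pvGrid grid q.1 q.2 ≠ pvGrid grid p.1 p.2) :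
    calculate_number_of_sides region grid max_x max_y = 4 * (region.length : Int) := by
  have inner0 : ∀ p ∈ region, ∀ (st : Int × PySem.Set ((Int × Int) × (Int × Int))),
      (get_neighbors p.1 p.2 max_x max_y).foldl (fun st q =>
        if pvGrid grid q.1 q.2 == pvGrid grid p.1 p.2 then
          if region.contains q then
            if PySem.Set.contains st.2 (pvPair p q) then st
            else (st.1 + 1, PySem.Set.add st.2 (pvPair p q))
          else st
        else st) st = st := by
    intro p hp st
    have hmem : ∀ q ∈ get_neighbors p.1 p.2 max_x max_y,
        (pvGrid grid q.1 q.2 == pvGrid grid p.1 p.2) = true → region.contains q = false := by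
      intro q hq hg
      have hqc : q ∈ pvCands p := by
        have := mem_cands_of_mem_nbrs p.1 p.2 max_x max_y q hq
        simpa using this
      have : q ∉ region := fun hm => hiso p hp q hqc hm (by simpa using hg)
      simpa using this
    have aux : ∀ (l : List (Int × Int)),
        (∀ q ∈ l, (pvGrid grid q.1 q.2 == pvGrid grid p.1 p.2) = true → region.contains q = false) →
        ∀ (st : Int × PySem.Set ((Int × Int) × (Int × Int))),
        l.foldl (fun st q =>
          if pvGrid grid q.1 q.2 == pvGrid grid p.1 p.2 then
            if region.contains q then
              if PySem.Set.contains st.2 (pvPair p q) then st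
              else (st.1 + 1, PySem.Set.add st.2 (pvPair p q))
            else st
          else st) st = st := by
      intro l
      induction l with
      | nil => intro _ st; rfl
      | cons q l ih =>
        intro hm st
        rw [List.foldl_cons]
        have hf : (if pvGrid grid q.1 q.2 == pvGrid grid p.1 p.2 then
            if region.contains q then
              if PySem.Set.contains st.2 (pvPair p q) then st
              else (st.1 + 1, PySem.Set.add st.2 (pvPair p q))
            else st
          else st) = st := by
          by_cases hg : (pvGrid grid q.1 q.2 == pvGrid grid p.1 p.2) = true
          · rw [if_pos hg, hm q (by simp) hg]
            simp
          · rw [if_neg hg]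
        rw [hf]
        exact ih (fun r hr hg => hm r (by simp [hr]) hg) st
    exact aux _ hmem st
  have outer0 : ∀ (l : List (Int × Int)), (∀ p ∈ l, p ∈ region) →
      ∀ (st : Int × PySem.Set ((Int × Int) × (Int × Int))),
      l.foldl (fun st p =>
        (get_neighbors p.1 p.2 max_x max_y).foldl (fun st q =>
          if pvGrid grid q.1 q.2 == pvGrid grid p.1 p.2 then
            if region.contains q then
              if PySem.Set.contains st.2 (pvPair p q) then st
              else (st.1 + 1, PySem.Set.add st.2 (pvPair p q))
            else st
          else st) st) st = st := by
    intro l hl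
    induction l with
    | nil => intro st; rfl
    | cons p l ih =>
      intro st
      rw [List.foldl_cons, inner0 p (hl p (by simp))]
      exact ih (fun r hr => hl r (by simp [hr])) st
  show 4 * (region.length : Int) - 2 * (region.foldl _ ((0 : Int), PySem.Set.empty)).1 = _
  rw [outer0 region (fun p hp => hp)]
  ring

lemma foldl_ite_count_zero {α : Type} (P : α → Prop) [DecidablePred P] (l : List α)
    (h : ∀ q ∈ l, ¬ P q) (c : Int) :
    l.foldl (fun (c : Int) q => if P q then c + 1 else c) c = c := by
  induction l generalizing c with
  | nil => rfl
  | cons q l ih =>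
    rw [List.foldl_cons, if_neg (h q (by simp))]
    exact ih (fun r hr => h r (by simp [hr])) c

-- when no two adjacent region cells carry the same letter B counts 4 for every cell
lemma B_iso (region : List (Int × Int)) (grid : List (List String)) (max_x max_y : Int)
    (hiso : ∀ p ∈ region, ∀ q ∈ pvCands p, q ∈ region → pvGrid grid q.1 q.2 ≠ pvGrid grid p.1 p.2) :
    calculate_number_of_sides_alt region grid max_x max_y = 4 * (region.length : Int) := by
  have hcov : ∀ p ∈ region,
      ([(p.1 - 1, p.2), (p.1 + 1, p.2), (p.1, p.2 - 1), (p.1, p.2 + 1)].foldl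
        (fun (c : Int) q =>
          if 0 ≤ q.1 ∧ q.1 < max_x ∧ 0 ≤ q.2 ∧ q.2 < max_y ∧
             PySem.Set.contains (PySem.Set.ofList region) q = true ∧
             pvGrid grid q.1 q.2 = pvGrid grid p.1 p.2
          then c + 1 else c) 0) = 0 := by
    intro p hp
    apply foldl_ite_count_zero
    intro q hq hcond
    have hqmem : q ∈ region := by
      have := hcond.2.2.2.2.1
      simpa [PySem.Set.mem_ofList] using this
    exact hiso p hp q (by simpa [pvCands] using hq) hqmem hcond.2.2.2.2.2
  have gen : ∀ (l : List (Int × Int)), (∀ p ∈ l, p ∈ region) → ∀ (i : Int),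
      l.foldl (fun perimeter p =>
        perimeter + (4 - ([(p.1 - 1, p.2), (p.1 + 1, p.2), (p.1, p.2 - 1), (p.1, p.2 + 1)].foldl
          (fun (c : Int) q =>
            if 0 ≤ q.1 ∧ q.1 < max_x ∧ 0 ≤ q.2 ∧ q.2 < max_y ∧
               PySem.Set.contains (PySem.Set.ofList region) q = true ∧
               pvGrid grid q.1 q.2 = pvGrid grid p.1 p.2
            then c + 1 else c) 0))) i = i + 4 * (l.length : Int) := by
    intro l hl
    induction l with
    | nil => intro i; simp
    | cons p l ih =>
      intro i
      rw [List.foldl_cons, hcov p (hl p (by simp)), ih (fun r hr => hl r (by simp [hr]))]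
      simp only [List.length_cons]
      push_cast
      ring
  show region.foldl _ 0 = _
  rw [gen region (fun p hp => hp) 0]
  ring

-- ===== VERDICT (by name: the statement is the Claim_ definition above) =====
theorem calculate_number_of_sides_spec : Claim_equal_calculate_number_of_sides := by
  intro region grid max_x max_y _ hpre
  obtain ⟨hN, hpre2 | hpre2⟩ := hpre
  · have hbox : ∀ p ∈ region, 0 ≤ p.1 ∧ p.1 < max_x ∧ 0 ≤ p.2 ∧ p.2 < max_y :=
      fun p hp => (hpre2 p hp).1
    unfold Spec_calculate_number_of_sides
    rw [A_closed region grid max_x max_y hbox, B_closed region grid max_x max_y,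
      E_handshake region grid max_x max_y hN hbox]
    push_cast
    ring
  · have hiso : ∀ p ∈ region, ∀ q ∈ pvCands p, q ∈ region → pvGrid grid q.1 q.2 ≠ pvGrid grid p.1 p.2 :=
      fun p hp => (hpre2 p hp).1
    unfold Spec_calculate_number_of_sides
    rw [A_iso region grid max_x max_y hiso, B_iso region grid max_x max_y hiso]
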